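-- pv_equiv track=rewrite | github.com/udonko-for-poke/nihonbare_bot1 | Commands/cmd_home.py | ranking_search
-- ===== SOURCE A (Python) =====
-- def ranking_search(_list, value_):
--     length = len(_list)
--     value = value_*1000
--     if (_list[0] < value):
--         return 0
--     if (_list[length-1] > value):
--         return length
--     rank = 0
--     if (_list[length//2] < value):
--         rank = ranking_search(_list[:length//2], value_)
--     else:
--         rank = (length//2)+ranking_search(_list[length//2:], value_)
--     return rank
-- ===== SOURCE B (Python) =====
-- def ranking_search(_list, value_):
--     value = value_ * 1000
--     n = len(_list)
--     if _list[0] < value: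
--         return 0
--     if _list[n-1] > value:
--         return n
--     lo, hi = 0, n
--     while lo < hi:
--         mid = (lo + hi) // 2
--         if _list[mid] > value:
--             lo = mid + 1
--         else:
--             hi = mid
--     return lo
-- ===== Notes on version B (the rewrite author's own statement) =====
-- stated objective: alternative
-- what changed: Replaced A's recursion on list slices (each step copies half the list) by an iterative index-based binary search over lo/hi bounds after the same two boundary exits; no slicing and no recursion.
-- outside the precondition, e.g. on ranking_search([2000, 1000, 500], 1): A raises RecursionError, B returns 1; on ranking_search([2000, 1000, 0, 3000, -1000, 0, 1000, 0], 1): A returns 4, B returns 1; on ranking_search([], 0): A raises IndexError, B raises IndexError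
import Mathlib
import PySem

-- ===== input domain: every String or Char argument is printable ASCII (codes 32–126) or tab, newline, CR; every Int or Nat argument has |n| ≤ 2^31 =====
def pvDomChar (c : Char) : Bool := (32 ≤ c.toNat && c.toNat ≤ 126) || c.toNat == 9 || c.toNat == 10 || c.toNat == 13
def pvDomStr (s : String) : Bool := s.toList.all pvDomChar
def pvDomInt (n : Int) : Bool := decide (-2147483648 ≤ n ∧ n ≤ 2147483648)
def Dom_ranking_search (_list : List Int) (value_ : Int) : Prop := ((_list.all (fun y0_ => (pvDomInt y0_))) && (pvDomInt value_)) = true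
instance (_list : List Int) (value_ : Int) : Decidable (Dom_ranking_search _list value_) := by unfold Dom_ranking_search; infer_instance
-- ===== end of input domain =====

-- B replaces A's recursion on copied list slices by an iterative index-based binary search over lo/hi bounds (objective: alternative).


-- ===== PORT A =====
-- A's recursion can loop forever in Python (when value_*1000 occurs in the list); the fuel
-- only makes the function total — inside Pre_ the fuel never runs out (proved below).
def rsFuel : Nat → List Int → Int → Int
  | 0, _, _ => 0
  | f+1, l, value_ =>
    let length : Int := (l.length : Int)
    let value := value_ * 1000
    match PySem.List.pyGet? l 0 with
    | none => 0
    | some x0 =>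
      if x0 < value then 0
      else
        match PySem.List.pyGet? l (length - 1) with
        | none => 0
        | some xl =>
          if xl > value then length
          else
            let h := PySem.Int.floordiv length 2
            match PySem.List.pyGet? l h with
            | none => 0
            | some xm =>
              if xm < value then rsFuel f (PySem.List.slice l none (some h)) value_
              else h + rsFuel f (PySem.List.slice l (some h) none) value_

def ranking_search (_list : List Int) (value_ : Int) : Int :=
  rsFuel (_list.length + 1) _list value_

-- ===== PORT B =====
def bsearchAux (l : List Int) (value : Int) (lo hi : Nat) : Nat :=
  if _h : lo < hi then
    let mid := (lo + hi) / 2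
    if l.getD mid 0 > value then bsearchAux l value (mid + 1) hi
    else bsearchAux l value lo mid
  else lo
termination_by hi - lo
decreasing_by all_goals omega

def ranking_search_alt (_list : List Int) (value_ : Int) : Int :=
  let value := value_ * 1000
  let n := _list.length
  match PySem.List.pyGet? _list 0 with
  | none => 0
  | some x0 =>
    if x0 < value then 0
    else
      match PySem.List.pyGet? _list ((n : Int) - 1) with
      | none => 0
      | some xl =>
        if xl > value then (n : Int)
        else (bsearchAux _list value 0 n : Int)

-- ===== PRECONDITION & SPEC =====
-- Pre_ excludes the empty list (A raises IndexError) and, among the lists on which neither of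
-- A's boundary exits fires, those not sorted in descending order (a binary search's contract:
-- A's probe path then yields an accidental rank, or recurses forever) and those containing
-- value_*1000 (A recurses on an identical list forever, RecursionError).
def Pre_ranking_search (_list : List Int) (value_ : Int) : Prop :=
  _list ≠ [] ∧
    (_list.getD 0 0 < value_ * 1000 ∨
     value_ * 1000 < _list.getD (_list.length - 1) 0 ∨
     (_list.Pairwise (· ≥ ·) ∧ value_ * 1000 ∉ _list))
instance (_list : List Int) (value_ : Int) : Decidable (Pre_ranking_search _list value_) := by
  unfold Pre_ranking_search; infer_instance

def pvWitness_ranking_search : List Int × Int := ([3000, 1000, -2000], 2)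

def Spec_ranking_search (_list : List Int) (value_ : Int) (out : Int) : Prop := out = ranking_search_alt _list value_
instance (_list : List Int) (value_ : Int) (out : Int) : Decidable (Spec_ranking_search _list value_ out) := by unfold Spec_ranking_search; infer_instance

-- ===== CLAIM (what is proved, stated in full; the proofs are below) =====
def Claim_equal_ranking_search : Prop := ∀ (_list : List Int) (value_ : Int), Dom_ranking_search _list value_ → Pre_ranking_search _list value_ → Spec_ranking_search _list value_ (ranking_search _list value_)

-- ===== LEMMAS AND PROOFS =====

-- Sorted (descending) access: i ≤ j → l[j] ≤ l[i]
theorem desc_getElem {l : List Int} (hp : l.Pairwise (· ≥ ·)) {i j : Nat}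
    (hij : i ≤ j) (hj : j < l.length) : l[j] ≤ l[i]'(lt_of_le_of_lt hij hj) := by
  rcases Nat.lt_or_ge i j with h | h
  · exact (List.pairwise_iff_getElem.mp hp i j _ hj h)
  · have : i = j := le_antisymm hij h
    subst this; exact le_refl _

-- Count of elements > value in a take-prefix all of whose elements are > value.
theorem countP_take_full (l : List Int) (value : Int) (r : Nat) (hr : r ≤ l.length)
    (h1 : ∀ i (hi : i < l.length), i < r → value < l[i]) :
    (l.take r).countP (fun x => decide (x > value)) = r := by
  rw [List.countP_eq_length.mpr, List.length_take_of_le hr]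
  intro a ha
  obtain ⟨i, hi, rfl⟩ := List.mem_iff_getElem.mp ha
  have hi' : i < r := lt_of_lt_of_le hi (by simp [List.length_take])
  have hil : i < l.length := lt_of_lt_of_le hi' hr
  simpa [List.getElem_take] using h1 i hil hi'

-- Count of elements > value in a drop-suffix all of whose elements are ≤ value.
theorem countP_drop_zero (l : List Int) (value : Int) (r : Nat)
    (h2 : ∀ i (hi : i < l.length), r ≤ i → l[i] ≤ value) :
    (l.drop r).countP (fun x => decide (x > value)) = 0 := by
  rw [List.countP_eq_zero]
  intro a ha
  obtain ⟨i, hi, rfl⟩ := List.mem_iff_getElem.mp ha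
  have hil : r + i < l.length := by simp [List.length_drop] at hi; omega
  have := h2 (r + i) hil (Nat.le_add_right r i)
  simp [List.getElem_drop]
  omega

-- Splitting the count at an index.
theorem countP_split (l : List Int) (p : Int → Bool) (r : Nat) :
    l.countP p = (l.take r).countP p + (l.drop r).countP p := by
  conv_lhs => rw [← List.take_append_drop r l]
  rw [List.countP_append]

-- If the first r elements are > value and the rest are ≤ value, the count of elements > value is r.
theorem countP_eq_boundary (l : List Int) (value : Int) (r : Nat) (hr : r ≤ l.length)
    (h1 : ∀ i (hi : i < l.length), i < r → value < l[i])
    (h2 : ∀ i (hi : i < l.length), r ≤ i → l[i] ≤ value) :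
    l.countP (fun x => decide (x > value)) = r := by
  rw [countP_split l _ r, countP_take_full l value r hr h1, countP_drop_zero l value r h2]
  omega

-- B's binary search finds the boundary of the > value prefix.
theorem bsearchAux_boundary (l : List Int) (value : Int) (hp : l.Pairwise (· ≥ ·)) :
    ∀ lo hi, hi ≤ l.length → lo ≤ hi →
    (∀ i (hi' : i < l.length), i < lo → value < l[i]) →
    (∀ i (hi' : i < l.length), hi ≤ i → l[i] ≤ value) →
    bsearchAux l value lo hi ≤ hi ∧
    (∀ i (hi' : i < l.length), i < bsearchAux l value lo hi → value < l[i]) ∧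
    (∀ i (hi' : i < l.length), bsearchAux l value lo hi ≤ i → l[i] ≤ value) := by
  intro lo hi
  generalize hn : hi - lo = n
  induction n using Nat.strong_induction_on generalizing lo hi with
  | _ n ih =>
    intro hhi hlh h1 h2
    rw [bsearchAux]
    by_cases hlt : lo < hi
    · simp only [hlt, dif_pos]
      have hmlo : lo ≤ (lo + hi) / 2 := by omega
      have hmhi : (lo + hi) / 2 < hi := by omega
      have hmlen : (lo + hi) / 2 < l.length := lt_of_lt_of_le hmhi hhi
      rw [List.getD_eq_getElem l 0 hmlen]
      by_cases hc : l[(lo + hi) / 2] > value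
      · simp only [hc, if_pos]
        refine ih (hi - ((lo + hi) / 2 + 1)) (by omega) _ _ rfl hhi (by omega) ?_ h2
        intro i hi' hilt
        exact lt_of_lt_of_le hc (desc_getElem hp (by omega) hmlen)
      · simp only [hc, if_neg, not_false_iff]
        obtain ⟨ha, hb, hc2⟩ := ih ((lo + hi) / 2 - lo) (by omega) _ _ rfl (le_of_lt hmlen) hmlo h1
          (fun i hi' hge => le_trans (desc_getElem hp hge hi') (by omega))
        exact ⟨le_trans ha (by omega), hb, hc2⟩
    · simp only [hlt, dif_neg, not_false_iff]
      exact ⟨by omega, h1, fun i hi' hge => h2 i hi' (by omega)⟩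

theorem rsFuel_count (value_ : Int) :
    ∀ fuel (l : List Int), l.length ≤ fuel → l ≠ [] → l.Pairwise (· ≥ ·) →
    value_ * 1000 ∉ l →
    rsFuel fuel l value_ = (l.countP (fun x => decide (x > value_ * 1000)) : Int) := by
  intro fuel
  induction fuel with
  | zero =>
    intro l hlen hne _ _
    exact absurd (List.eq_nil_of_length_eq_zero (by omega)) hne
  | succ f ih =>
    intro l hlen hne hp hnot
    have hl0 : 0 < l.length := List.length_pos_of_ne_nil hne
    have e0 : PySem.List.pyGet? l 0 = some (l[0]'hl0) := by
      rw [PySem.List.pyGet?_zero, List.getElem?_eq_getElem hl0]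
    have elast : PySem.List.pyGet? l ((l.length : Int) - 1) = some (l[l.length - 1]'(by omega)) := by
      have hcast : ((l.length : Int) - 1) = ((l.length - 1 : Nat) : Int) := by omega
      rw [hcast, PySem.List.pyGet?_natCast, List.getElem?_eq_getElem (by omega)]
    have hmidn : l.length / 2 < l.length := Nat.div_lt_self hl0 (by norm_num)
    have efd : PySem.Int.floordiv (l.length : Int) 2 = ((l.length / 2 : Nat) : Int) := by
      exact_mod_cast PySem.Int.floordiv_natCast l.length 2
    have emid : PySem.List.pyGet? l ((l.length / 2 : Nat) : Int) = some (l[l.length / 2]'hmidn) := by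
      rw [PySem.List.pyGet?_natCast, List.getElem?_eq_getElem hmidn]
    rw [rsFuel]
    simp only [efd, e0, elast, emid]
    by_cases hb1 : l[0]'hl0 < value_ * 1000
    · -- first element already below: all elements below, count 0
      simp only [hb1, if_pos]
      rw [countP_eq_boundary l (value_ * 1000) 0 (Nat.zero_le _)
        (by intro i hi h; omega)
        (by intro i hi _; exact le_of_lt (lt_of_le_of_lt (desc_getElem hp (Nat.zero_le i) hi) hb1))]
      simp
    · simp only [hb1, if_neg, not_false_iff]
      by_cases hb2 : l[l.length - 1]'(by omega) > value_ * 1000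
      · -- last element above: all elements above, count = length
        simp only [hb2, if_pos]
        rw [countP_eq_boundary l (value_ * 1000) l.length (le_refl _)
          (by intro i hi _; exact lt_of_lt_of_le hb2 (desc_getElem hp (by omega) (by omega)))
          (by intro i hi h; omega)]
      · simp only [hb2, if_neg, not_false_iff]
        -- length 1 would force l[0] = value, excluded by Pre_
        have hn2 : 2 ≤ l.length := by
          by_contra hcon
          have h1 : l.length = 1 := by omega
          have : l[0]'hl0 = value_ * 1000 := by
            have : l.length - 1 = 0 := by omega
            simp only [this] at hb2; omega
          exact hnot (this ▸ List.getElem_mem hl0)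
        have hk1 : 1 ≤ l.length / 2 := by omega
        have hkle : l.length / 2 ≤ l.length - 1 := by omega
        have etake : PySem.List.slice l none (some ((l.length / 2 : Nat) : Int)) = l.take (l.length / 2) :=
          PySem.List.slice_to_natCast l (l.length / 2)
        have edrop : PySem.List.slice l (some ((l.length / 2 : Nat) : Int)) none = l.drop (l.length / 2) :=
          PySem.List.slice_from_natCast l (l.length / 2)
        have hlenf : l.length / 2 ≤ f := by omega
        have htne : l.take (l.length / 2) ≠ [] := by
          intro hcontra
          rcases List.take_eq_nil_iff.mp hcontra with h | h
          · omega
          · exact hne h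
        have hdne : l.drop (l.length / 2) ≠ [] := by
          simp only [ne_eq, List.drop_eq_nil_iff]
          omega
        by_cases hb3 : l[l.length / 2]'hmidn < value_ * 1000
        · -- middle below value: the answer lives in the left half
          simp only [hb3, if_pos, etake]
          rw [ih (l.take (l.length / 2))
            (by rw [List.length_take_of_le (by omega)]; exact hlenf)
            htne
            (List.Pairwise.sublist (List.take_sublist _ _) hp)
            (fun hm => hnot ((List.take_sublist _ _).subset hm))]
          rw [countP_split l _ (l.length / 2),
            countP_drop_zero l (value_ * 1000) (l.length / 2)
              (by intro i hi h
                  exact le_of_lt (lt_of_le_of_lt (desc_getElem hp h hi) hb3))]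
          simp
        · -- middle above value: count the left half and recurse right
          simp only [hb3, if_neg, not_false_iff, edrop]
          have hmgt : value_ * 1000 < l[l.length / 2]'hmidn := by
            have hne' : l[l.length / 2]'hmidn ≠ value_ * 1000 :=
              fun h => hnot (h ▸ List.getElem_mem hmidn)
            omega
          rw [ih (l.drop (l.length / 2))
            (by rw [List.length_drop]; omega)
            hdne
            (List.Pairwise.sublist (List.drop_sublist _ _) hp)
            (fun hm => hnot ((List.drop_sublist _ _).subset hm))]
          rw [countP_split l _ (l.length / 2),
            countP_take_full l (value_ * 1000) (l.length / 2) (by omega)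
              (by intro i hi h
                  exact lt_of_lt_of_le hmgt (desc_getElem hp (by omega) hmidn))]
          push_cast
          ring

theorem bsearch_count (l : List Int) (value : Int) (hp : l.Pairwise (· ≥ ·)) :
    l.countP (fun x => decide (x > value)) = bsearchAux l value 0 l.length := by
  obtain ⟨h1, h2, h3⟩ := bsearchAux_boundary l value hp 0 l.length (le_refl _)
    (Nat.zero_le _) (by intro i _ h; omega) (by intro i hi' h; omega)
  exact countP_eq_boundary l value _ h1 h2 h3

-- ===== VERDICT (by name: the statement is the Claim_ definition above) =====
theorem ranking_search_spec : Claim_equal_ranking_search := by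
  intro l v _ hpre
  obtain ⟨hne, hdisj⟩ := hpre
  have hl0 : 0 < l.length := List.length_pos_of_ne_nil hne
  have hlast : l.length - 1 < l.length := by omega
  have e0 : PySem.List.pyGet? l 0 = some (l[0]'hl0) := by
    rw [PySem.List.pyGet?_zero, List.getElem?_eq_getElem hl0]
  have elast : PySem.List.pyGet? l ((l.length : Int) - 1) = some (l[l.length - 1]'hlast) := by
    have hcast : ((l.length : Int) - 1) = ((l.length - 1 : Nat) : Int) := by omega
    rw [hcast, PySem.List.pyGet?_natCast, List.getElem?_eq_getElem hlast]
  have hd0 : l.getD 0 0 = l[0]'hl0 := List.getD_eq_getElem l 0 hl0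
  have hdl : l.getD (l.length - 1) 0 = l[l.length - 1]'hlast := List.getD_eq_getElem l 0 hlast
  unfold Spec_ranking_search
  by_cases h0 : l[0]'hl0 < v * 1000
  · have ha : ranking_search l v = 0 := by
      unfold ranking_search; rw [rsFuel]; simp only [e0]; simp [h0]
    have hb : ranking_search_alt l v = 0 := by
      unfold ranking_search_alt; simp only [e0]; simp [h0]
    rw [ha, hb]
  · by_cases h2 : l[l.length - 1]'hlast > v * 1000
    · have ha : ranking_search l v = (l.length : Int) := by
        unfold ranking_search; rw [rsFuel]; simp only [e0, elast]; simp [h0, h2]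
      have hb : ranking_search_alt l v = (l.length : Int) := by
        unfold ranking_search_alt; simp only [e0, elast]; simp [h0, h2]
      rw [ha, hb]
    · have hsm : l.Pairwise (· ≥ ·) ∧ v * 1000 ∉ l := by
        rcases hdisj with h | h | h
        · rw [hd0] at h; exact absurd h h0
        · rw [hdl] at h; exact absurd h h2
        · exact h
      have hb : ranking_search_alt l v = (bsearchAux l (v * 1000) 0 l.length : Int) := by
        unfold ranking_search_alt; simp only [e0, elast]; simp [h0, h2]
      unfold ranking_search
      rw [rsFuel_count v _ l (Nat.le_succ _) hne hsm.1 hsm.2, hb,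
        bsearch_count l (v * 1000) hsm.1]
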